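-- pv_equiv track=rewrite | github.com/Eeshu-Yadav/intern_UMA | suggester/views.py | select_actions
-- ===== SOURCE A (Python) =====
-- ACTION_MAPPING = {
--     "food": ["ORDER_FOOD", "FIND_RECIPE", "LOCATE_RESTAURANT"],
--     "question": ["ASK_HELP", "SEARCH_KNOWLEDGE_BASE", "CONTACT_SUPPORT"],
--     "news": ["SHARE_SOCIAL", "SAVE_NEWS", "CREATE_POST"],
--     "urgent": ["EMERGENCY_SERVICES", "PRIORITY_ASSISTANCE", "CONTACT_AUTHORITIES"],
--     "default": ["GENERAL_SEARCH", "HELP_CENTER", "CONTACT_US"]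
-- }
--
-- def select_actions(tone, intent):
--     intent_lower = intent.lower()
--     tone_lower = tone.lower()
--
--     # Check for urgency first
--     if "urgent" in tone_lower or "emergency" in intent_lower:
--         return ACTION_MAPPING["urgent"]
--
--     # Food-related scenarios
--     food_triggers = {"food", "hungry", "craving", "pizza", "eat", "restaurant"}
--     if (any(t in intent_lower for t in food_triggers) or
--         any(t in tone_lower for t in {"hungry", "craving"})):
--         return ACTION_MAPPING["food"]
--
--     # Question detection
--     if "question" in intent_lower or "how" in intent_lower:
--         return ACTION_MAPPING["question"]
--
--     # News sharing detection
--     if "news" in intent_lower or "share" in intent_lower: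
--         return ACTION_MAPPING["news"]
--
--     return ACTION_MAPPING["default"]
-- ===== SOURCE B (Python) =====
-- ACTION_MAPPING = {
--     "food": ["ORDER_FOOD", "FIND_RECIPE", "LOCATE_RESTAURANT"],
--     "question": ["ASK_HELP", "SEARCH_KNOWLEDGE_BASE", "CONTACT_SUPPORT"],
--     "news": ["SHARE_SOCIAL", "SAVE_NEWS", "CREATE_POST"],
--     "urgent": ["EMERGENCY_SERVICES", "PRIORITY_ASSISTANCE", "CONTACT_AUTHORITIES"],
--     "default": ["GENERAL_SEARCH", "HELP_CENTER", "CONTACT_US"]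
-- }
--
-- # Flat keyword table: (keyword, which field it applies to, category it tags).
-- KEYWORD_TABLE = [
--     ("urgent", "tone", "urgent"), ("emergency", "intent", "urgent"),
--     ("food", "intent", "food"), ("hungry", "intent", "food"), ("craving", "intent", "food"),
--     ("pizza", "intent", "food"), ("eat", "intent", "food"), ("restaurant", "intent", "food"),
--     ("hungry", "tone", "food"), ("craving", "tone", "food"),
--     ("question", "intent", "question"), ("how", "intent", "question"),
--     ("news", "intent", "news"), ("share", "intent", "news"),
-- ]
--
-- PRIORITY = ["urgent", "food", "question", "news"]
--
-- def select_actions(tone, intent):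
--     # Pass 1: tag the input with every category whose keyword occurs (no early exit).
--     texts = {"tone": tone.lower(), "intent": intent.lower()}
--     matched = [cat for kw, field, cat in KEYWORD_TABLE if kw in texts[field]]
--     # Pass 2: resolve the highest-priority tagged category.
--     for cat in PRIORITY:
--         if cat in matched:
--             return ACTION_MAPPING[cat]
--     return ACTION_MAPPING["default"]
-- ===== Notes on version B (the rewrite author's own statement) =====
-- stated objective: alternative
-- what changed: Replaced the short-circuiting if-cascade with two staged passes: a tagging pass that collects ALL categories whose keyword occurs from a flat keyword table, then a separate priority-resolution pass over the matched categories.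
import Mathlib
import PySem

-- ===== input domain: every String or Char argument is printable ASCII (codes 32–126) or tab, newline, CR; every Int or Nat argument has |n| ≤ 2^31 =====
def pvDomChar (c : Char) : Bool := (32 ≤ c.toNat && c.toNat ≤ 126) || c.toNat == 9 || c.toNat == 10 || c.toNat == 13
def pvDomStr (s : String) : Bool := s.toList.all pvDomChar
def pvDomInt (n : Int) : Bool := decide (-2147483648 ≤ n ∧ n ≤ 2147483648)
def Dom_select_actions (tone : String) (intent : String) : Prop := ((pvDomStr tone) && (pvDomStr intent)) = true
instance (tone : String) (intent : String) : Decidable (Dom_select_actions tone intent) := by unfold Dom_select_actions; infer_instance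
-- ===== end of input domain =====

-- ===== PORT A =====
-- B replaces A's short-circuit if-cascade by two staged passes (tag all matching categories
-- from a flat keyword table, then resolve priority); alternative decomposition, same cost.
def actionMapping : PySem.Dict String (List String) :=
  PySem.Dict.ofList
  [("food", ["ORDER_FOOD", "FIND_RECIPE", "LOCATE_RESTAURANT"]),
   ("question", ["ASK_HELP", "SEARCH_KNOWLEDGE_BASE", "CONTACT_SUPPORT"]),
   ("news", ["SHARE_SOCIAL", "SAVE_NEWS", "CREATE_POST"]),
   ("urgent", ["EMERGENCY_SERVICES", "PRIORITY_ASSISTANCE", "CONTACT_AUTHORITIES"]),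
   ("default", ["GENERAL_SEARCH", "HELP_CENTER", "CONTACT_US"])]

def select_actions (tone : String) (intent : String) : List String :=
  let intent_lower := PySem.Str.lower intent
  let tone_lower := PySem.Str.lower tone
  if PySem.Str.isIn "urgent" tone_lower || PySem.Str.isIn "emergency" intent_lower then
    PySem.Dict.getD actionMapping "urgent" []
  else if (["food", "hungry", "craving", "pizza", "eat", "restaurant"].any
             (fun t => PySem.Str.isIn t intent_lower)) ||
          (["hungry", "craving"].any (fun t => PySem.Str.isIn t tone_lower)) then
    PySem.Dict.getD actionMapping "food" []
  else if PySem.Str.isIn "question" intent_lower || PySem.Str.isIn "how" intent_lower then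
    PySem.Dict.getD actionMapping "question" []
  else if PySem.Str.isIn "news" intent_lower || PySem.Str.isIn "share" intent_lower then
    PySem.Dict.getD actionMapping "news" []
  else
    PySem.Dict.getD actionMapping "default" []

-- ===== PORT B =====
-- keyword table: (keyword, isToneField, category); "tone" field encoded as true
def kwTable : List (String × Bool × String) :=
  [("urgent", true, "urgent"), ("emergency", false, "urgent"),
   ("food", false, "food"), ("hungry", false, "food"), ("craving", false, "food"),
   ("pizza", false, "food"), ("eat", false, "food"), ("restaurant", false, "food"),
   ("hungry", true, "food"), ("craving", true, "food"),
   ("question", false, "question"), ("how", false, "question"),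
   ("news", false, "news"), ("share", false, "news")]

-- pass 1: every category whose keyword occurs in its field
def matchedCats (tl il : String) : List String :=
  (kwTable.filter (fun e => PySem.Str.isIn e.1 (if e.2.1 then tl else il))).map (fun e => e.2.2)

-- pass 2: first priority category that was tagged
def priorityScan (matched : List String) : List String → List String
  | [] => PySem.Dict.getD actionMapping "default" []
  | cat :: rest =>
    if matched.contains cat then PySem.Dict.getD actionMapping cat []
    else priorityScan matched rest

def select_actions_alt (tone : String) (intent : String) : List String :=
  priorityScan (matchedCats (PySem.Str.lower tone) (PySem.Str.lower intent))
    ["urgent", "food", "question", "news"]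

-- ===== PRECONDITION & SPEC =====
def Spec_select_actions (tone : String) (intent : String) (out : List String) : Prop := out = select_actions_alt tone intent
instance (tone : String) (intent : String) (out : List String) : Decidable (Spec_select_actions tone intent out) := by unfold Spec_select_actions; infer_instance

-- ===== CLAIM (what is proved, stated in full; the proofs are below) =====
def Claim_equal_select_actions : Prop := ∀ (tone : String) (intent : String), Dom_select_actions tone intent → Spec_select_actions tone intent (select_actions tone intent)

-- ===== LEMMAS AND PROOFS =====

theorem contains_matched (tl il : String) (c : String) :
    (matchedCats tl il).contains c =
      (kwTable.any (fun e => c == e.2.2 && PySem.Str.isIn e.1 (if e.2.1 then tl else il))) := by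
  simp [matchedCats, List.contains_eq_mem, List.mem_map, List.mem_filter, List.any_eq]

-- ===== VERDICT (by name: the statement is the Claim_ definition above) =====
theorem select_actions_spec : Claim_equal_select_actions := by
  intro tone intent _
  unfold Spec_select_actions select_actions select_actions_alt
  simp only [priorityScan, contains_matched, kwTable, List.any_eq]
  simp [or_assoc]
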